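-- pv_equiv track=rewrite | github.com/lenguyenchiquoc/Thesis | Analyze/finderprint.py | _effective_match_count
-- ===== SOURCE A (Python) =====
-- def _effective_match_count(best_type: str, matched: dict) -> int:
--     KNOWN_COOCCURRENCE = {
--         ("Wrapper", "PHP"),
--         ("PHP",     "Wrapper"),
--     }
--     others = [t for t in matched if t != best_type]
--     real_conflicts = sum(
--         1 for t in others
--         if (best_type, t) not in KNOWN_COOCCURRENCE
--     )
--     return real_conflicts + 1
-- ===== SOURCE B (Python) =====
-- def _effective_match_count(best_type: str, matched: dict) -> int:
--     partner = {"Wrapper": "PHP", "PHP": "Wrapper"}.get(best_type)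
--     n = len(matched) - (1 if best_type in matched else 0)
--     if partner is not None and partner in matched:
--         n -= 1
--     return n + 1
-- ===== Notes on version B (the rewrite author's own statement) =====
-- stated objective: simpler
-- what changed: Replaces the two per-key scans (build 'others', then filter against the cooccurrence pair-set) by closed-form cardinality arithmetic: len(matched) minus membership tests for best_type and its single known cooccurrence partner, looked up in a partner dict.
import Mathlib
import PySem

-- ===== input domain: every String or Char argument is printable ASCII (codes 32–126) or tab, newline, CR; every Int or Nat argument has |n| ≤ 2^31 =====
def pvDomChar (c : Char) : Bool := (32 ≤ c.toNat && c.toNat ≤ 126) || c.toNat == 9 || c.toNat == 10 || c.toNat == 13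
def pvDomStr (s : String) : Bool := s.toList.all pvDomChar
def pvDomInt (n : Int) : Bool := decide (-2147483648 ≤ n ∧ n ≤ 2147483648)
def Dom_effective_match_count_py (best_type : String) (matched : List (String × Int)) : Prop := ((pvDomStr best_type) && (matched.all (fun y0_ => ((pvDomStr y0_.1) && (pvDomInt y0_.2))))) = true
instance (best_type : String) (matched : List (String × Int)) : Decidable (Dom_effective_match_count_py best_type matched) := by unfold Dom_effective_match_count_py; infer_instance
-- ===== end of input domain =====

-- B replaces the two per-key scans of A by closed-form cardinality arithmetic
-- (len minus membership tests for best_type and its cooccurrence partner): simpler.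


-- ===== PORT A =====
def effective_match_count_py (best_type : String) (matched : List (String × Int)) : Int :=
  let known : PySem.Set (String × String) :=
    PySem.Set.ofList [("Wrapper", "PHP"), ("PHP", "Wrapper")]
  let d := PySem.Dict.ofList matched
  let others := d.keys.filter (fun t => t != best_type)
  let real_conflicts : Int :=
    ((others.filter (fun t => !(PySem.Set.contains known (best_type, t)))).length : Int)
  real_conflicts + 1

-- ===== PORT B =====
def effective_match_count_py_alt (best_type : String) (matched : List (String × Int)) : Int :=
  let partner := (PySem.Dict.ofList [("Wrapper", "PHP"), ("PHP", "Wrapper")]).get? best_type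
  let d := PySem.Dict.ofList matched
  let n0 : Int := (d.size : Int) - (if d.contains best_type then 1 else 0)
  let n1 : Int :=
    match partner with
    | some p => if d.contains p then n0 - 1 else n0
    | none => n0
  n1 + 1

-- ===== PRECONDITION & SPEC =====
def Spec_effective_match_count_py (best_type : String) (matched : List (String × Int)) (out : Int) : Prop := out = effective_match_count_py_alt best_type matched
instance (best_type : String) (matched : List (String × Int)) (out : Int) : Decidable (Spec_effective_match_count_py best_type matched out) := by unfold Spec_effective_match_count_py; infer_instance

-- ===== CLAIM (what is proved, stated in full; the proofs are below) =====
def Claim_equal_effective_match_count_py : Prop := ∀ (best_type : String) (matched : List (String × Int)), Dom_effective_match_count_py best_type matched → Spec_effective_match_count_py best_type matched (effective_match_count_py best_type matched)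

-- ===== LEMMAS AND PROOFS =====

-- filtering one element out of a nodup list drops exactly its (0/1) occurrence
lemma pv_filter_ne_length (ks : List String) (h : ks.Nodup) (x : String) :
    (((ks.filter (fun t => t != x)).length : Int)) = (ks.length : Int) - (if x ∈ ks then 1 else 0) := by
  induction ks with
  | nil => simp
  | cons a tl ih =>
    have hnd := h.of_cons
    have hna : a ∉ tl := (List.nodup_cons.mp h).1
    by_cases hax : a = x
    · have hx : x ∉ tl := hax ▸ hna
      simp [List.filter_cons, hax, hx, ih hnd]
    · by_cases hx : x ∈ tl <;>
        simp [List.filter_cons, hax, hx, ih hnd, Ne.symm hax] <;> omega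

lemma pv_filter_ne2_length (ks : List String) (h : ks.Nodup) (x y : String) (hxy : x ≠ y) :
    (((ks.filter (fun t => t != x && t != y)).length : Int))
      = (ks.length : Int) - (if x ∈ ks then 1 else 0) - (if y ∈ ks then 1 else 0) := by
  induction ks with
  | nil => simp
  | cons a tl ih =>
    have hnd := h.of_cons
    have hna : a ∉ tl := (List.nodup_cons.mp h).1
    by_cases hax : a = x
    · have hx : x ∉ tl := hax ▸ hna
      have hay : a ≠ y := by rw [hax]; exact hxy
      by_cases hy : y ∈ tl <;>
        simp [List.filter_cons, hax, hay, hx, hy, ih hnd, hxy, Ne.symm hxy] <;> omega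
    · by_cases hay : a = y
      · have hy : y ∉ tl := hay ▸ hna
        by_cases hx : x ∈ tl <;>
          simp [List.filter_cons, hax, hay, hx, hy, ih hnd, hxy, Ne.symm hxy] <;> omega
      · by_cases hx : x ∈ tl <;> by_cases hy : y ∈ tl <;>
          simp [List.filter_cons, hax, hay, hx, hy, ih hnd, Ne.symm hax, Ne.symm hay] <;> omega

lemma pv_keys_len (matched : List (String × Int)) :
    ((PySem.Dict.ofList matched).size : Int) = (((PySem.Dict.ofList matched).keys).length : Int) := by
  simp [PySem.Dict.size, PySem.Dict.keys]

lemma pv_partner_dict :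
    PySem.Dict.ofList [(("Wrapper" : String), ("PHP" : String)), ("PHP", "Wrapper")]
      = PySem.Dict.mk [("Wrapper", "PHP"), ("PHP", "Wrapper")] := by decide

lemma pv_known_set :
    PySem.Set.ofList [(("Wrapper" : String), ("PHP" : String)), ("PHP", "Wrapper")]
      = [("Wrapper", "PHP"), ("PHP", "Wrapper")] := by decide

-- ===== VERDICT (by name: the statement is the Claim_ definition above) =====
theorem effective_match_count_py_spec : Claim_equal_effective_match_count_py := by
  intro b matched _
  unfold Spec_effective_match_count_py effective_match_count_py effective_match_count_py_alt
  simp only [pv_partner_dict, pv_known_set]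
  set ks := (PySem.Dict.ofList matched).keys with hks
  have hnd : ks.Nodup := PySem.Dict.nodup_keys_ofList matched
  have hcont : ∀ x, (PySem.Dict.ofList matched).contains x = decide (x ∈ ks) := by
    intro x; rw [PySem.Dict.contains_eq_decide_mem_keys]
  rw [List.filter_filter]
  by_cases hW : b = "Wrapper"
  · subst hW
    have hpred : ∀ t ∈ ks,
        (!(PySem.Set.contains [(("Wrapper" : String), ("PHP" : String)), ("PHP", "Wrapper")] ("Wrapper", t))
           && (t != "Wrapper")) = ((t != "Wrapper") && (t != "PHP")) := by
      intro t _
      by_cases h1 : t = "Wrapper" <;> by_cases h2 : t = "PHP" <;>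
        simp [h1, h2, PySem.Set.contains]
    rw [List.filter_congr hpred, pv_filter_ne2_length ks hnd _ _ (by decide), pv_keys_len]
    simp only [PySem.Dict.get?_mk_cons, hcont]
    by_cases h1 : ("Wrapper" : String) ∈ ks <;> by_cases h2 : ("PHP" : String) ∈ ks <;>
      simp [h1, h2] <;> ring
  · by_cases hP : b = "PHP"
    · subst hP
      have hpred : ∀ t ∈ ks,
          (!(PySem.Set.contains [(("Wrapper" : String), ("PHP" : String)), ("PHP", "Wrapper")] ("PHP", t))
             && (t != "PHP")) = ((t != "PHP") && (t != "Wrapper")) := by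
        intro t _
        by_cases h1 : t = "PHP" <;> by_cases h2 : t = "Wrapper" <;>
          simp [h1, h2, PySem.Set.contains]
      rw [List.filter_congr hpred, pv_filter_ne2_length ks hnd _ _ (by decide), pv_keys_len]
      simp only [PySem.Dict.get?_mk_cons, hcont]
      by_cases h1 : ("PHP" : String) ∈ ks <;> by_cases h2 : ("Wrapper" : String) ∈ ks <;>
        simp [h1, h2] <;> ring
    · have hpred : ∀ t ∈ ks,
          (!(PySem.Set.contains [(("Wrapper" : String), ("PHP" : String)), ("PHP", "Wrapper")] (b, t))
             && (t != b)) = (t != b) := by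
        intro t _
        simp [PySem.Set.contains, Prod.ext_iff, hW, hP]
      rw [List.filter_congr hpred, pv_filter_ne_length ks hnd, pv_keys_len]
      have hbW : (("Wrapper" : String) == b) = false := by
        simp [Ne.symm hW]
      have hbP : (("PHP" : String) == b) = false := by
        simp [Ne.symm hP]
      simp only [PySem.Dict.get?_mk_cons, hbW, hbP, hcont, if_false]
      have : (PySem.Dict.mk ([] : List (String × String))).get? b = none := by
        simp [PySem.Dict.get?]
      rw [this]
      by_cases h1 : b ∈ ks <;> simp [h1, hks]
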